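-- pv_equiv track=rewrite | github.com/G3Ram/blind-75 | graphs/alien_dictionary.py | is_valid_alien_order
-- ===== SOURCE A (Python) =====
-- from typing import List
--
-- def is_valid_alien_order(words: List[str], order: str) -> bool:
--     """Helper to validate that a given order is consistent with the word list."""
--     chars_in_words = set(''.join(words))
--     if set(order) != chars_in_words or len(order) != len(chars_in_words):
--         return False
--     rank = {c: i for i, c in enumerate(order)}
--     for i in range(len(words) - 1):
--         w1, w2 = words[i], words[i + 1]
--         found_diff = False
--         for j in range(min(len(w1), len(w2))):
--             if w1[j] != w2[j]:
--                 if rank[w1[j]] >= rank[w2[j]]: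
--                     return False
--                 found_diff = True
--                 break
--         if not found_diff and len(w1) > len(w2):
--             return False
--     return True
-- ===== SOURCE B (Python) =====
-- def is_valid_alien_order(words, order):
--     chars_in_words = set(''.join(words))
--     if set(order) != chars_in_words or len(order) != len(chars_in_words):
--         return False
--     rank = {c: i for i, c in enumerate(order)}
--     encoded = [[rank[c] for c in w] for w in words]
--     return all(encoded[i] <= encoded[i + 1] for i in range(len(encoded) - 1))
-- ===== Notes on version B (the rewrite author's own statement) =====
-- stated objective: simpler
-- what changed: Instead of A's per-pair char loop with a found_diff flag plus a separate prefix/length check, B encodes every word once as its list of ranks and compares adjacent encodings with built-in lexicographic list <=, which subsumes both rules.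
import Mathlib
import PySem

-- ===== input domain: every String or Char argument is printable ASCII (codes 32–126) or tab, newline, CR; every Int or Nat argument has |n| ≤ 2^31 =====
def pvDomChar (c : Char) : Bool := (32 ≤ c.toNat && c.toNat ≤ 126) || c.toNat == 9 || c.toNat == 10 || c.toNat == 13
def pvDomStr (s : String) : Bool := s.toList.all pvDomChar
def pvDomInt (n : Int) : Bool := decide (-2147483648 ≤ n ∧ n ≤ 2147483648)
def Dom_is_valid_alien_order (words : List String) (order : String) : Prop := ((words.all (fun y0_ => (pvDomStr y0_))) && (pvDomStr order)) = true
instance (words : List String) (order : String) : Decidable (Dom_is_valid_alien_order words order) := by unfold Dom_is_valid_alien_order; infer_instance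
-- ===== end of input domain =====

-- B replaces A's per-pair char loop (found_diff flag + separate length check) by encoding each
-- word as its rank sequence once and comparing adjacent encodings lexicographically ("simpler").

-- ===== PORT A =====
-- rank = {c: i for i, c in enumerate(order)}  (shared by both ports: identical line in both Pythons)
def pvRank (order : List Char) : PySem.Dict Char Int :=
  (PySem.List.enumerate order).foldl (fun d p => d.insert p.2 p.1) PySem.Dict.empty

-- inner 'for j in range(min(len(w1), len(w2)))' loop: none = 'return False', some fd = loop done
def pvInnerA (rank : PySem.Dict Char Int) : List Char → List Char → Option Bool
  | a :: as, b :: bs =>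
      if a ≠ b then
        if rank.getD a 0 ≥ rank.getD b 0 then none else some true
      else pvInnerA rank as bs
  | _, _ => some false

-- outer 'for i in range(len(words) - 1)' loop over adjacent pairs
def pvOuterA (rank : PySem.Dict Char Int) : List String → Bool
  | w1 :: w2 :: rest =>
      match pvInnerA rank w1.toList w2.toList with
      | none => false
      | some fd =>
          if !fd && decide (w2.toList.length < w1.toList.length) then false
          else pvOuterA rank (w2 :: rest)
  | _ => true

def is_valid_alien_order (words : List String) (order : String) : Bool :=
  let chars_in_words : PySem.Set Char := PySem.Set.ofList (PySem.Str.join "" words).toList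
  if !PySem.Set.equal (PySem.Set.ofList order.toList) chars_in_words
      || decide (PySem.Str.len order ≠ PySem.Set.len chars_in_words) then
    false
  else
    pvOuterA (pvRank order.toList) words

-- ===== PORT B =====
-- Python's lexicographic '<=' on two lists of ints
def pvLexLe : List Int → List Int → Bool
  | [], _ => true
  | _ :: _, [] => false
  | a :: as, b :: bs => if a < b then true else if b < a then false else pvLexLe as bs

-- [rank[c] for c in w]
def pvEncode (rank : PySem.Dict Char Int) (w : String) : List Int :=
  w.toList.map (fun c => rank.getD c 0)

-- all(encoded[i] <= encoded[i+1] for i in range(len(encoded)-1)) (short-circuit &&)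
def pvChain : List (List Int) → Bool
  | e1 :: e2 :: rest => pvLexLe e1 e2 && pvChain (e2 :: rest)
  | _ => true

def is_valid_alien_order_alt (words : List String) (order : String) : Bool :=
  let chars_in_words : PySem.Set Char := PySem.Set.ofList (PySem.Str.join "" words).toList
  if !PySem.Set.equal (PySem.Set.ofList order.toList) chars_in_words
      || decide (PySem.Str.len order ≠ PySem.Set.len chars_in_words) then
    false
  else
    pvChain (words.map (pvEncode (pvRank order.toList)))

-- ===== PRECONDITION & SPEC =====
def Spec_is_valid_alien_order (words : List String) (order : String) (out : Bool) : Prop := out = is_valid_alien_order_alt words order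
instance (words : List String) (order : String) (out : Bool) : Decidable (Spec_is_valid_alien_order words order out) := by unfold Spec_is_valid_alien_order; infer_instance

-- ===== CLAIM (what is proved, stated in full; the proofs are below) =====
def Claim_equal_is_valid_alien_order : Prop := ∀ (words : List String) (order : String), Dom_is_valid_alien_order words order → Spec_is_valid_alien_order words order (is_valid_alien_order words order)

-- ===== LEMMAS AND PROOFS =====

-- folding inserts whose keys all differ from a leaves a's lookup unchanged
theorem pv_get?_foldl_skip (a : Char) :
    ∀ (l : List (Int × Char)) (d : PySem.Dict Char Int), (∀ p ∈ l, p.2 ≠ a) →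
    (l.foldl (fun d p => d.insert p.2 p.1) d).get? a = d.get? a := by
  intro l
  induction l with
  | nil => intro d _; rfl
  | cons p l ih =>
      intro d h
      simp only [List.foldl_cons]
      rw [ih _ (fun q hq => h q (List.mem_cons_of_mem _ hq))]
      exact PySem.Dict.get?_insert_of_ne d p.1 (Ne.symm (h p List.mem_cons_self))

-- lookup in the rank fold: every member of cs gets some index s+k with cs[k] = a
theorem pv_rank_get (a : Char) :
    ∀ (cs : List Char), a ∈ cs → ∀ (s : Int) (d : PySem.Dict Char Int),
    ∃ (k : Nat) (hk : k < cs.length),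
      ((PySem.List.enumerate cs s).foldl (fun d p => d.insert p.2 p.1) d).get? a = some (s + k)
        ∧ cs[k] = a := by
  intro cs
  induction cs with
  | nil => intro h; exact absurd h (List.not_mem_nil)
  | cons c cs ih =>
      intro hmem s d
      rw [PySem.List.enumerate_cons]
      simp only [List.foldl_cons]
      by_cases hin : a ∈ cs
      · obtain ⟨k, hk, hg, he⟩ := ih hin (s + 1) (d.insert c s)
        refine ⟨k + 1, by simpa using hk, ?_, by simpa using he⟩
        rw [hg]; congr 1; push_cast; ring
      · have hac : a = c := by
          rcases List.mem_cons.mp hmem with h | h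
          · exact h
          · exact absurd h hin
        refine ⟨0, by simp, ?_, by simp [hac]⟩
        rw [pv_get?_foldl_skip a _ _ ?_]
        · rw [hac]; simp [PySem.Dict.get?_insert_self]
        · intro p hp
          obtain ⟨j, hj, hpe⟩ := (PySem.List.mem_enumerate_iff _ _ _).mp hp
          intro hpa
          exact hin (by rw [hpe] at hpa; simp at hpa; rw [← hpa]; exact List.getElem_mem hj)

-- getD on pvRank is injective on the members of cs
theorem pv_rank_inj (cs : List Char) (a b : Char) (ha : a ∈ cs) (hb : b ∈ cs)
    (h : (pvRank cs).getD a 0 = (pvRank cs).getD b 0) : a = b := by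
  obtain ⟨k, hk, hga, hea⟩ := pv_rank_get a cs ha 0 PySem.Dict.empty
  obtain ⟨k', hk', hgb, heb⟩ := pv_rank_get b cs hb 0 PySem.Dict.empty
  have ha' : (pvRank cs).getD a 0 = (k : Int) := by
    rw [pvRank, PySem.Dict.getD_eq_get?_getD, hga]; simp
  have hb' : (pvRank cs).getD b 0 = (k' : Int) := by
    rw [pvRank, PySem.Dict.getD_eq_get?_getD, hgb]; simp
  have : k = k' := by rw [ha', hb'] at h; exact_mod_cast h
  subst this
  rw [← hea, ← heb]

-- one adjacent pair: A's inner loop verdict equals lexicographic ≤ of the encodings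
theorem pv_pair_eq (rank : PySem.Dict Char Int) :
    ∀ (as bs : List Char),
    (∀ a ∈ as, ∀ b ∈ bs, rank.getD a 0 = rank.getD b 0 → a = b) →
    (match pvInnerA rank as bs with
     | none => false
     | some fd => !(!fd && decide (bs.length < as.length)))
    = pvLexLe (as.map (fun c => rank.getD c 0)) (bs.map (fun c => rank.getD c 0)) := by
  intro as
  induction as with
  | nil => intro bs _; cases bs <;> simp [pvInnerA, pvLexLe]
  | cons a as ih =>
      intro bs hinj
      cases bs with
      | nil =>
          have h0 : pvInnerA rank (a :: as) [] = some false := rfl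
          rw [h0]
          simp [pvLexLe]
      | cons b bs =>
          by_cases hab : a = b
          · subst hab
            have h0 : pvInnerA rank (a :: as) (a :: bs) = pvInnerA rank as bs := by
              simp [pvInnerA]
            have h1 : pvLexLe ((a :: as).map (fun c => rank.getD c 0))
                ((a :: bs).map (fun c => rank.getD c 0))
                = pvLexLe (as.map (fun c => rank.getD c 0)) (bs.map (fun c => rank.getD c 0)) := by
              simp [pvLexLe]
            rw [h0, h1]
            have := ih bs (fun x hx y hy => hinj x (List.mem_cons_of_mem _ hx) y (List.mem_cons_of_mem _ hy))
            rw [← this]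
            cases h : pvInnerA rank as bs with
            | none => simp
            | some fd => simp
          · have hne : rank.getD a 0 ≠ rank.getD b 0 := fun h =>
              hab (hinj a (List.mem_cons_self) b (List.mem_cons_self) h)
            simp only [pvInnerA, if_pos hab, List.map_cons, pvLexLe]
            by_cases hge : rank.getD a 0 ≥ rank.getD b 0
            · have hgt : rank.getD b 0 < rank.getD a 0 := lt_of_le_of_ne hge (Ne.symm hne)
              rw [if_pos hge, if_neg (by omega), if_pos hgt]
            · have hlt : rank.getD a 0 < rank.getD b 0 := by omega
              rw [if_neg hge, if_pos hlt]
              simp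
  
-- the outer loop equals the chain of lexicographic comparisons
theorem pv_outer_eq (rank : PySem.Dict Char Int) :
    ∀ (ws : List String),
    (∀ w ∈ ws, ∀ a ∈ w.toList, ∀ w' ∈ ws, ∀ b ∈ w'.toList,
        rank.getD a 0 = rank.getD b 0 → a = b) →
    pvOuterA rank ws = pvChain (ws.map (pvEncode rank)) := by
  intro ws
  induction ws with
  | nil => intro _; rfl
  | cons w1 ws ih =>
      intro hinj
      cases ws with
      | nil => rfl
      | cons w2 rest =>
          have hp := pv_pair_eq rank w1.toList w2.toList
            (fun a ha b hb => hinj w1 (List.mem_cons_self) a ha w2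
              (List.mem_cons_of_mem _ (List.mem_cons_self)) b hb)
          have ht := ih (fun w hw a ha w' hw' b hb =>
            hinj w (List.mem_cons_of_mem _ hw) a ha w' (List.mem_cons_of_mem _ hw') b hb)
          simp only [List.map_cons, pvChain, pvEncode] at *
          cases h : pvInnerA rank w1.toList w2.toList with
          | none =>
              rw [h] at hp
              simp only [pvOuterA, h]
              simp only [] at hp
              rw [← hp]
              simp
          | some fd =>
              rw [h] at hp
              simp only [pvOuterA, h]
              simp only [] at hp
              by_cases hc : (!fd && decide (w2.toList.length < w1.toList.length)) = true
              · rw [if_pos hc]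
                rw [hc] at hp
                simp only [Bool.not_true] at hp
                rw [← hp]
                simp
              · rw [if_neg hc]
                rw [Bool.not_eq_true] at hc
                rw [hc] at hp
                simp only [Bool.not_false] at hp
                rw [← hp, ht]
                simp

-- membership in ''.join(words)
theorem pv_mem_join (a : Char) :
    ∀ (ws : List String) (w : String), w ∈ ws → a ∈ w.toList →
    a ∈ (PySem.Str.join "" ws).toList := by
  intro ws
  induction ws with
  | nil => intro w hw; exact absurd hw (List.not_mem_nil)
  | cons w1 ws ih =>
      intro w hw ha
      cases ws with
      | nil =>
          rcases List.mem_cons.mp hw with h | h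
          · subst h
            rw [PySem.Str.toList_join]
            simpa [PySem.Chars.join_singleton] using ha
          · exact absurd h (List.not_mem_nil)
      | cons w2 rest =>
          have : (PySem.Str.join "" (w1 :: w2 :: rest)).toList
              = w1.toList ++ (PySem.Str.join "" (w2 :: rest)).toList := by
            rw [PySem.Str.toList_join, PySem.Str.toList_join]
            simp [PySem.Chars.join_cons_cons]
          rw [this, List.mem_append]
          rcases List.mem_cons.mp hw with h | h
          · subst h; exact Or.inl ha
          · exact Or.inr (ih w h ha)

-- ===== VERDICT (by name: the statement is the Claim_ definition above) =====
theorem is_valid_alien_order_spec : Claim_equal_is_valid_alien_order := by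
  intro words order _
  unfold Spec_is_valid_alien_order is_valid_alien_order is_valid_alien_order_alt
  cases hgb : (!PySem.Set.equal (PySem.Set.ofList order.toList)
        (PySem.Set.ofList (PySem.Str.join "" words).toList)
      || decide (PySem.Str.len order ≠ PySem.Set.len (PySem.Set.ofList (PySem.Str.join "" words).toList))) with
  | true => simp only [hgb, if_true]
  | false =>
      simp only [hgb, Bool.false_eq_true, if_false]
      have heq : PySem.Set.equal (PySem.Set.ofList order.toList)
          (PySem.Set.ofList (PySem.Str.join "" words).toList) = true := by
        rcases Bool.or_eq_false_iff.mp hgb with ⟨h1, _⟩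
        simpa using h1
      have hmemo : ∀ c : Char, c ∈ (PySem.Str.join "" words).toList → c ∈ order.toList := by
        intro c hc
        have h2 : c ∈ PySem.Set.ofList ((PySem.Str.join "" words).toList) := by
          simpa [PySem.Set.mem_ofList] using hc
        have h3 := ((PySem.Set.equal_iff _ _).mp heq c).mpr h2
        simpa [PySem.Set.mem_ofList] using h3
      exact pv_outer_eq (pvRank order.toList) words (by
        intro w hw a ha w' hw' b hb h
        exact pv_rank_inj order.toList a b
          (hmemo a (pv_mem_join a words w hw ha))
          (hmemo b (pv_mem_join b words w' hw' hb)) h)
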